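-- pv_equiv track=rewrite | github.com/steveburton4/advent_of_code_2024 | Day 2/day2.py | is_list_safe_allowing_an_error
-- ===== SOURCE A (Python) =====
-- def is_safe_difference_between_two_numbers(previous_number, current_number):
--     diff = abs(previous_number - current_number)
--     return not (diff < 1 or diff > 3)
--
-- def is_list_safe(unsorted_number_list):
--     if not unsorted_number_list:
--         return False
--
--     previous_number = unsorted_number_list[0]
--     previous_number_was_increasing = True
--
--     for current_item_count in range(1, len(unsorted_number_list)):
--         current_item = unsorted_number_list[current_item_count]
--         if not is_safe_difference_between_two_numbers(previous_number, current_item):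
--             return False
--
--         is_current_number_increasing = (previous_number < current_item)
--         if current_item_count > 1 and previous_number_was_increasing is not is_current_number_increasing:
--             return False
--
--         previous_number_was_increasing = is_current_number_increasing
--         previous_number = current_item
--
--     return True
--
-- def is_list_safe_allowing_an_error(number_list):
--     if is_list_safe(number_list):
--         return True
--
--     for list_item_count in range(0, len(number_list)):
--         check_list = number_list.copy()
--         del(check_list[list_item_count])
--         if is_list_safe(check_list):
--             return True
--
--     return False
-- ===== SOURCE B (Python) =====
-- def _chain_ok(ok, xs):
--     return all(ok(xs[k - 1], xs[k]) for k in range(1, len(xs)))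
--
--
-- def _check_direction(number_list, ok):
--     j = None
--     for k in range(1, len(number_list)):
--         if not ok(number_list[k - 1], number_list[k]):
--             j = k
--             break
--     if j is None:
--         return True
--     # only removing one endpoint of the first bad pair can help
--     return (_chain_ok(ok, number_list[:j - 1] + number_list[j:])
--             or _chain_ok(ok, number_list[:j] + number_list[j + 1:]))
--
--
-- def is_list_safe_allowing_an_error(number_list):
--     if not number_list:
--         return False
--     inc = lambda a, b: 1 <= b - a <= 3
--     dec = lambda a, b: 1 <= a - b <= 3
--     return _check_direction(number_list, inc) or _check_direction(number_list, dec)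
-- ===== Notes on version B (the rewrite author's own statement) =====
-- stated objective: faster
-- what changed: Instead of re-checking safety of every one-element-removed copy of the list, B scans once per direction (increasing/decreasing), finds the first violating adjacent pair, and tests only the two removals of that pair's endpoints.
import Mathlib
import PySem

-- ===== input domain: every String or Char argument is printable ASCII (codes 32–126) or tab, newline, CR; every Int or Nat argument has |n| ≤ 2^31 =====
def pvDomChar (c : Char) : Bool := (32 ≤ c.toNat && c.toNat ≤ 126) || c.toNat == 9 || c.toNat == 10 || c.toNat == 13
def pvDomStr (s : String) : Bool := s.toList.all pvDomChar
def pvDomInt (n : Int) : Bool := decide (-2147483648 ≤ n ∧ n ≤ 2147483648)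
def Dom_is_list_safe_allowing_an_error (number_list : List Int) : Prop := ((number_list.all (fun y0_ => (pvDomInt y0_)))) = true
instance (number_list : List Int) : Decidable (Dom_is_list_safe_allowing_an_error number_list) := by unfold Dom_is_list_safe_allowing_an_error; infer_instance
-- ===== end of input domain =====

-- B replaces A's try-every-removal O(n^2) scan by a per-direction single pass that tests only
-- the two removals at the first violating adjacent pair (measured asymptotically faster).

-- ===== PORT A =====
def pvIsSafeDiff (previous_number current_number : Int) : Bool :=
  let diff := |previous_number - current_number|
  !(diff < 1 || diff > 3)

-- the for-loop of is_list_safe: state (previous_number, previous_number_was_increasing, current_item_count)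
def pvSafeLoop (rest : List Int) (previous_number : Int) (previous_number_was_increasing : Bool)
    (current_item_count : Nat) : Bool :=
  match rest with
  | [] => true
  | current_item :: rs =>
    if !pvIsSafeDiff previous_number current_item then false
    else
      let is_current_number_increasing := decide (previous_number < current_item)
      if current_item_count > 1 && previous_number_was_increasing != is_current_number_increasing then false
      else pvSafeLoop rs current_item is_current_number_increasing (current_item_count + 1)

def pvIsListSafe (unsorted_number_list : List Int) : Bool :=
  match unsorted_number_list with
  | [] => false
  | previous_number :: rest => pvSafeLoop rest previous_number true 1

def is_list_safe_allowing_an_error (number_list : List Int) : Bool :=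
  if pvIsListSafe number_list then true
  else (List.range number_list.length).any (fun i => pvIsListSafe (number_list.eraseIdx i))

-- ===== PORT B =====
def pvChainOk (ok : Int → Int → Bool) : List Int → Bool
  | a :: b :: rs => ok a b && pvChainOk ok (b :: rs)
  | _ => true

-- index (of the second element) of the first adjacent pair violating ok
def pvFirstBad (ok : Int → Int → Bool) : List Int → Option Nat
  | a :: b :: rs => if ok a b then (pvFirstBad ok (b :: rs)).map (· + 1) else some 1
  | _ => none

def pvCheckDirection (number_list : List Int) (ok : Int → Int → Bool) : Bool :=
  match pvFirstBad ok number_list with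
  | none => true
  | some j => pvChainOk ok (number_list.eraseIdx (j - 1)) || pvChainOk ok (number_list.eraseIdx j)

def pvInc (a b : Int) : Bool := 1 ≤ b - a && b - a ≤ 3
def pvDec (a b : Int) : Bool := 1 ≤ a - b && a - b ≤ 3

def is_list_safe_allowing_an_error_alt (number_list : List Int) : Bool :=
  match number_list with
  | [] => false
  | _ => pvCheckDirection number_list pvInc || pvCheckDirection number_list pvDec

-- ===== PRECONDITION & SPEC =====
def Spec_is_list_safe_allowing_an_error (number_list : List Int) (out : Bool) : Prop := out = is_list_safe_allowing_an_error_alt number_list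
instance (number_list : List Int) (out : Bool) : Decidable (Spec_is_list_safe_allowing_an_error number_list out) := by unfold Spec_is_list_safe_allowing_an_error; infer_instance

-- ===== CLAIM (what is proved, stated in full; the proofs are below) =====
def Claim_equal_is_list_safe_allowing_an_error : Prop := ∀ (number_list : List Int), Dom_is_list_safe_allowing_an_error number_list → Spec_is_list_safe_allowing_an_error number_list (is_list_safe_allowing_an_error number_list)

-- ===== LEMMAS AND PROOFS =====

lemma pvSafeDiff_iff (p c : Int) :
    pvIsSafeDiff p c = true ↔ (1 ≤ p - c ∧ p - c ≤ 3) ∨ (1 ≤ c - p ∧ c - p ≤ 3) := by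
  simp only [pvIsSafeDiff, Bool.not_eq_true', Bool.or_eq_false_iff, decide_eq_false_iff_not, not_lt]
  rcases abs_cases (p - c) with ⟨h, _⟩ | ⟨h, _⟩ <;> rw [h] <;> omega

lemma pvInc_true_iff (a b : Int) : pvInc a b = true ↔ 1 ≤ b - a ∧ b - a ≤ 3 := by
  simp [pvInc]

lemma pvDec_true_iff (a b : Int) : pvDec a b = true ↔ 1 ≤ a - b ∧ a - b ≤ 3 := by
  simp [pvDec]

lemma pvInc_false_iff (a b : Int) : pvInc a b = false ↔ ¬ (1 ≤ b - a ∧ b - a ≤ 3) := by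
  rw [Bool.eq_false_iff, Ne, pvInc_true_iff]

lemma pvDec_false_iff (a b : Int) : pvDec a b = false ↔ ¬ (1 ≤ a - b ∧ a - b ≤ 3) := by
  rw [Bool.eq_false_iff, Ne, pvDec_true_iff]

lemma pvChainOk_tail (ok : Int → Int → Bool) (a : Int) (m : List Int)
    (h : pvChainOk ok m = false) : pvChainOk ok (a :: m) = false := by
  cases m with
  | nil => simp [pvChainOk] at h
  | cons b rs => simp only [pvChainOk] at h ⊢; simp [h]

lemma pvFirstBad_none_iff (ok : Int → Int → Bool) :
    ∀ l : List Int, pvFirstBad ok l = none ↔ pvChainOk ok l = true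
  | [] => by simp [pvFirstBad, pvChainOk]
  | [a] => by simp [pvFirstBad, pvChainOk]
  | a :: b :: rs => by
    by_cases h : ok a b = true
    · simp only [pvFirstBad, pvChainOk, h, if_pos, Bool.true_and, Option.map_eq_none_iff]
      exact pvFirstBad_none_iff ok (b :: rs)
    · simp [pvFirstBad, pvChainOk, h]

lemma pvFirstBad_bounds (ok : Int → Int → Bool) :
    ∀ l : List Int, ∀ j : Nat, pvFirstBad ok l = some j → 1 ≤ j ∧ j < l.length
  | [] => by simp [pvFirstBad]
  | [a] => by simp [pvFirstBad]
  | a :: b :: rs => by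
    intro j h
    by_cases hab : ok a b = true
    · simp only [pvFirstBad, hab, if_pos, Option.map_eq_some_iff] at h
      obtain ⟨j', hj', rfl⟩ := h
      have := pvFirstBad_bounds ok (b :: rs) j' hj'
      simp only [List.length_cons] at this ⊢
      omega
    · simp [pvFirstBad, hab] at h
      subst h
      simp only [List.length_cons]; omega

lemma pvChainOk_of_firstBad_some (ok : Int → Int → Bool) (l : List Int) (j : Nat)
    (h : pvFirstBad ok l = some j) : pvChainOk ok l = false := by
  cases hc : pvChainOk ok l with
  | false => rfl
  | true => rw [← pvFirstBad_none_iff] at hc; rw [hc] at h; exact absurd h (by simp)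

-- removing any index other than the two endpoints of the first bad pair keeps the list bad
lemma pvFirstBad_erase (ok : Int → Int → Bool) :
    ∀ l : List Int, ∀ j i : Nat, pvFirstBad ok l = some j → i ≠ j - 1 → i ≠ j →
      pvChainOk ok (l.eraseIdx i) = false
  | [] => by simp [pvFirstBad]
  | [a] => by simp [pvFirstBad]
  | a :: b :: rs => by
    intro j i h hi1 hi2
    by_cases hab : ok a b = true
    · simp only [pvFirstBad, hab, if_pos, Option.map_eq_some_iff] at h
      obtain ⟨j', hj', rfl⟩ := h
      have hb := pvFirstBad_bounds ok (b :: rs) j' hj'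
      have hj1 : 1 ≤ j' := hb.1
      cases i with
      | zero =>
        simp only [List.eraseIdx]
        exact pvChainOk_of_firstBad_some ok (b :: rs) j' hj'
      | succ k =>
        simp only [List.eraseIdx]
        apply pvChainOk_tail
        exact pvFirstBad_erase ok (b :: rs) j' k hj' (by omega) (by omega)
    · simp [pvFirstBad, hab] at h
      subst h
      match i, hi1, hi2 with
        | k + 2, _, _ =>
          simp only [List.eraseIdx, pvChainOk]
          simp [hab]

lemma pvSafeLoop_dir :
    ∀ (rest : List Int) (prev : Int) (dir : Bool) (cnt : Nat), 2 ≤ cnt →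
      pvSafeLoop rest prev dir cnt = pvChainOk (if dir then pvInc else pvDec) (prev :: rest)
  | [], prev, dir, cnt, _ => by cases dir <;> simp [pvSafeLoop, pvChainOk]
  | c :: rs, prev, dir, cnt, hc => by
    have hrec := pvSafeLoop_dir rs c (decide (prev < c)) (cnt + 1) (by omega)
    have hcnt : (cnt > 1) = True := by simp; omega
    by_cases hsafe : pvIsSafeDiff prev c = true
    · by_cases hlt : prev < c
      · have hinc : pvInc prev c = true := by
          rw [pvInc_true_iff]
          rcases (pvSafeDiff_iff prev c).1 hsafe with h | h <;> omega
        have hdec : pvDec prev c = false := by rw [pvDec_false_iff]; omega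
        cases dir with
        | true =>
          simp only [pvSafeLoop, hsafe, Bool.not_true, Bool.false_eq_true, if_false, hcnt,
            decide_eq_true hlt, decide_true, bne_self_eq_false,
            Bool.and_false, if_true]
          simp only [decide_eq_true hlt, if_true] at hrec ⊢
          simp [hrec, pvChainOk, hinc]
        | false =>
          simp only [pvSafeLoop, hsafe, Bool.not_true, Bool.false_eq_true, if_false, hcnt,
            decide_eq_true hlt, decide_true, if_false]
          simp [pvChainOk, hdec]
      · have hdec : pvDec prev c = true := by
          rw [pvDec_true_iff]
          rcases (pvSafeDiff_iff prev c).1 hsafe with h | h <;> omega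
        have hinc : pvInc prev c = false := by rw [pvInc_false_iff]; omega
        cases dir with
        | false =>
          simp only [pvSafeLoop, hsafe, Bool.not_true, Bool.false_eq_true, if_false, hcnt,
            decide_eq_false hlt]
          simp only [decide_eq_false hlt] at hrec ⊢
          simp [hrec, pvChainOk, hdec]
        | true =>
          simp only [pvSafeLoop, hsafe, Bool.not_true, Bool.false_eq_true, if_false, hcnt,
            decide_eq_false hlt, if_true]
          simp [pvChainOk, hinc]
    · have hinc : pvInc prev c = false := by
        rw [pvInc_false_iff]
        intro hcon
        exact hsafe ((pvSafeDiff_iff prev c).2 (Or.inr hcon))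
      have hdec : pvDec prev c = false := by
        rw [pvDec_false_iff]
        intro hcon
        exact hsafe ((pvSafeDiff_iff prev c).2 (Or.inl hcon))
      simp only [Bool.not_eq_true] at hsafe
      cases dir <;> simp [pvSafeLoop, hsafe, pvChainOk, hinc, hdec]

lemma pvIsListSafe_char (l : List Int) :
    pvIsListSafe l = true ↔ l ≠ [] ∧ (pvChainOk pvInc l = true ∨ pvChainOk pvDec l = true) := by
  match l with
  | [] => simp [pvIsListSafe]
  | [p] => simp [pvIsListSafe, pvSafeLoop, pvChainOk]
  | p :: c :: rs =>
    have hloop := pvSafeLoop_dir rs c (decide (p < c)) 2 (by omega)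
    by_cases hsafe : pvIsSafeDiff p c = true
    · simp only [pvIsListSafe, pvSafeLoop, hsafe, Bool.not_true, Bool.false_eq_true, if_false,
        show ((1:Nat) > 1) = False by simp, decide_false, Bool.false_and]
      rw [hloop]
      by_cases hlt : p < c
      · have hinc : pvInc p c = true := by
          rw [pvInc_true_iff]
          rcases (pvSafeDiff_iff p c).1 hsafe with h | h <;> omega
        have hdec : pvDec p c = false := by rw [pvDec_false_iff]; omega
        simp only [decide_eq_true hlt, if_true]
        simp [pvChainOk, hinc, hdec]
      · have hdec : pvDec p c = true := by
          rw [pvDec_true_iff]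
          rcases (pvSafeDiff_iff p c).1 hsafe with h | h <;> omega
        have hinc : pvInc p c = false := by rw [pvInc_false_iff]; omega
        simp only [decide_eq_false hlt]
        simp [pvChainOk, hinc, hdec]
    · have hinc : pvInc p c = false := by
        rw [pvInc_false_iff]
        intro hcon
        exact hsafe ((pvSafeDiff_iff p c).2 (Or.inr hcon))
      have hdec : pvDec p c = false := by
        rw [pvDec_false_iff]
        intro hcon
        exact hsafe ((pvSafeDiff_iff p c).2 (Or.inl hcon))
      simp only [Bool.not_eq_true] at hsafe
      simp [pvIsListSafe, pvSafeLoop, hsafe, pvChainOk, hinc, hdec]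

lemma pvDir_equiv (l : List Int) (ok : Int → Int → Bool) :
    (pvChainOk ok l = true ∨ ∃ i, i < l.length ∧ pvChainOk ok (l.eraseIdx i) = true) ↔
      pvCheckDirection l ok = true := by
  cases hfb : pvFirstBad ok l with
  | none =>
    have hchain := (pvFirstBad_none_iff ok l).1 hfb
    simp only [pvCheckDirection, hfb, iff_true]
    exact Or.inl hchain
  | some j =>
    have hbad := pvChainOk_of_firstBad_some ok l j hfb
    have hb := pvFirstBad_bounds ok l j hfb
    simp only [pvCheckDirection, hfb, Bool.or_eq_true]
    constructor
    · rintro (h | ⟨i, hi, hci⟩)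
      · rw [hbad] at h; exact absurd h (by simp)
      · by_cases h1 : i = j - 1
        · left; rw [← h1]; exact hci
        · by_cases h2 : i = j
          · right; rw [← h2]; exact hci
          · rw [pvFirstBad_erase ok l j i hfb h1 h2] at hci
            exact absurd hci (by simp)
    · rintro (h | h)
      · exact Or.inr ⟨j - 1, by omega, h⟩
      · exact Or.inr ⟨j, by omega, h⟩

lemma pvEraseIdx_ne_nil (a b : Int) (rs : List Int) (i : Nat) :
    (a :: b :: rs).eraseIdx i ≠ [] := by
  cases i with
  | zero => simp [List.eraseIdx]
  | succ k => simp [List.eraseIdx]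

-- ===== VERDICT (by name: the statement is the Claim_ definition above) =====
theorem is_list_safe_allowing_an_error_spec : Claim_equal_is_list_safe_allowing_an_error := by
  intro l _
  unfold Spec_is_list_safe_allowing_an_error
  match l with
  | [] => decide
  | [a] =>
    have h : pvIsListSafe [a] = true := by simp [pvIsListSafe, pvSafeLoop]
    simp [is_list_safe_allowing_an_error, h, is_list_safe_allowing_an_error_alt,
      pvCheckDirection, pvFirstBad]
  | a :: b :: rs =>
    set l' : List Int := a :: b :: rs with hl'
    rw [Bool.eq_iff_iff]
    have hA : is_list_safe_allowing_an_error l' = true ↔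
        (pvIsListSafe l' = true ∨ ∃ i, i < l'.length ∧ pvIsListSafe (l'.eraseIdx i) = true) := by
      unfold is_list_safe_allowing_an_error
      by_cases h : pvIsListSafe l' = true
      · simp [h]
      · simp only [Bool.not_eq_true] at h
        simp [h, List.any_eq_true, List.mem_range]
    rw [hA]
    have hAlt : is_list_safe_allowing_an_error_alt l' = true ↔
        (pvCheckDirection l' pvInc = true ∨ pvCheckDirection l' pvDec = true) := by
      simp [is_list_safe_allowing_an_error_alt, hl']
    rw [hAlt, ← pvDir_equiv l' pvInc, ← pvDir_equiv l' pvDec]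
    have hne : l' ≠ [] := by simp [hl']
    constructor
    · rintro (hs | ⟨i, hi, hs⟩)
      · rcases (pvIsListSafe_char l').1 hs with ⟨_, hin | hde⟩
        · exact Or.inl (Or.inl hin)
        · exact Or.inr (Or.inl hde)
      · rcases (pvIsListSafe_char (l'.eraseIdx i)).1 hs with ⟨_, hin | hde⟩
        · exact Or.inl (Or.inr ⟨i, hi, hin⟩)
        · exact Or.inr (Or.inr ⟨i, hi, hde⟩)
    · rintro ((hin | ⟨i, hi, hin⟩) | (hde | ⟨i, hi, hde⟩))
      · exact Or.inl ((pvIsListSafe_char l').2 ⟨hne, Or.inl hin⟩)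
      · exact Or.inr ⟨i, hi, (pvIsListSafe_char (l'.eraseIdx i)).2
          ⟨pvEraseIdx_ne_nil a b rs i, Or.inl hin⟩⟩
      · exact Or.inl ((pvIsListSafe_char l').2 ⟨hne, Or.inr hde⟩)
      · exact Or.inr ⟨i, hi, (pvIsListSafe_char (l'.eraseIdx i)).2
          ⟨pvEraseIdx_ne_nil a b rs i, Or.inr hde⟩⟩
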